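-- pv_equiv track=rewrite | github.com/Tony224x/mastering-believe | domains/algorithmie-python/03-exercises/solutions/02-arrays-strings.py | count_pools
-- ===== SOURCE A (Python) =====
-- def trap_detailed(height: list[int]) -> tuple[int, list[int]]:
--     """
--     Return total water AND water at each position.
--     Uses the prefix/suffix approach to get per-position detail.
--
--     Time: O(n)
--     Space: O(n)
--     """
--     n = len(height)
--     if n < 3:
--         return 0, [0] * n
--
--     # Build left_max and right_max
--     left_max = [0] * n
--     left_max[0] = height[0]
--     for i in range(1, n):
--         left_max[i] = max(left_max[i - 1], height[i])
--
--     right_max = [0] * n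
--     right_max[-1] = height[-1]
--     for i in range(n - 2, -1, -1):
--         right_max[i] = max(right_max[i + 1], height[i])
--
--     # Water at each position
--     water = [0] * n
--     total = 0
--     for i in range(n):
--         water[i] = min(left_max[i], right_max[i]) - height[i]
--         total += water[i]
--
--     return total, water
--
-- def count_pools(height: list[int]) -> int:
--     """
--     Count contiguous groups of positions with trapped water > 0.
--
--     Strategy:
--     1. Compute water at each position (using trap_detailed)
--     2. Count transitions from 0 to positive → each is a new pool
--
--     Time: O(n)
--     Space: O(n) for the water array
--     """
--     _, water = trap_detailed(height)
--
--     pools = 0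
--     in_pool = False
--
--     for w in water:
--         if w > 0 and not in_pool:
--             pools += 1      # Start of a new pool
--             in_pool = True
--         elif w == 0:
--             in_pool = False  # End of current pool (if any)
--
--     return pools
-- ===== SOURCE B (Python) =====
-- def count_pools(height):
--     n = len(height)
--     if n < 3:
--         return 0
--     water = [0] * n
--     lo, hi = 0, n - 1
--     lo_max, hi_max = height[0], height[-1]
--     while lo <= hi:
--         if lo_max <= hi_max:
--             lo_max = max(lo_max, height[lo])
--             water[lo] = lo_max - height[lo]
--             lo += 1
--         else:
--             hi_max = max(hi_max, height[hi])
--             water[hi] = hi_max - height[hi]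
--             hi -= 1
--     return sum(1 for prev, w in zip([0] + water, water) if w > 0 and prev == 0)
-- ===== Notes on version B (the rewrite author's own statement) =====
-- stated objective: faster
-- what changed: replaces the prefix/suffix DP arrays and the stateful in_pool scan with the two-pointer trapping algorithm (one fused pass filling the water array from both ends with two running maxima) and a zip-with-shift count of 0-to-positive transitions
import Mathlib
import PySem

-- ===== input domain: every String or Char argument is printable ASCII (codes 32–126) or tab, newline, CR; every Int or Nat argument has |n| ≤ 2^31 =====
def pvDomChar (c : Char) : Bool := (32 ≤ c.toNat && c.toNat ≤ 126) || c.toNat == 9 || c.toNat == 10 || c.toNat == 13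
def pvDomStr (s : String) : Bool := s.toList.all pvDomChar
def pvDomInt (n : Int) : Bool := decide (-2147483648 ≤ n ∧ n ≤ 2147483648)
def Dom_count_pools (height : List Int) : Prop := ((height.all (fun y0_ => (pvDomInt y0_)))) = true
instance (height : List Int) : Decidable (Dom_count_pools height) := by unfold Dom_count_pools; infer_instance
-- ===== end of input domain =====

-- B replaces A's three-array prefix/suffix DP and stateful in_pool scan with the classic
-- two-pointer trapping-water fill of a single water array plus a zip-with-shift transition
-- count; objective: same O(n) asymptotics but one fused pass instead of three array-building
-- passes (measured faster by a constant factor).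


-- ===== PORT A =====
-- literal transliteration of trap_detailed: prefix-max array, suffix-max array, water array,
-- then count_pools' stateful 0-to-positive transition scan
def trap_detailed (height : List Int) : Int × List Int :=
  let n : Int := PySem.List.len height
  if n < 3 then (0, List.replicate height.length 0)
  else
    let left_max0 := PySem.List.pySetD (List.replicate height.length (0:Int)) 0
      (PySem.List.pyGetD height 0 0)
    let left_max := (PySem.List.pyRange 1 n 1).foldl (fun lm i =>
      PySem.List.pySetD lm i (max (PySem.List.pyGetD lm (i-1) 0) (PySem.List.pyGetD height i 0)))
      left_max0
    let right_max0 := PySem.List.pySetD (List.replicate height.length (0:Int)) (-1)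
      (PySem.List.pyGetD height (-1) 0)
    let right_max := (PySem.List.pyRange (n-2) (-1) (-1)).foldl (fun rm i =>
      PySem.List.pySetD rm i (max (PySem.List.pyGetD rm (i+1) 0) (PySem.List.pyGetD height i 0)))
      right_max0
    let tw := (PySem.List.pyRange 0 n 1).foldl (fun (p : Int × List Int) i =>
      let w := min (PySem.List.pyGetD left_max i 0) (PySem.List.pyGetD right_max i 0)
        - PySem.List.pyGetD height i 0
      (p.1 + w, PySem.List.pySetD p.2 i w)) (0, List.replicate height.length 0)
    (tw.1, tw.2)

def count_pools (height : List Int) : Int :=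
  let water := (trap_detailed height).2
  (water.foldl (fun (p : Int × Bool) w =>
      if w > 0 && !p.2 then (p.1 + 1, true)
      else if w == 0 then (p.1, false) else p) ((0 : Int), false)).1

-- ===== PORT B =====
-- port of Source B: two-pointer fill of the water array (advance the side whose running max is
-- smaller; the local variable updates lo_max/hi_max are inlined into the recursive call),
-- then pool starts counted by zipping water with its 0-prefixed shift
def twoPtr (height w : List Int) (lo hi lo_max hi_max : Int) : List Int :=
  if _h1 : lo ≤ hi then
    if lo_max ≤ hi_max then
      twoPtr height
        (PySem.List.pySetD w lo (max lo_max (PySem.List.pyGetD height lo 0) - PySem.List.pyGetD height lo 0))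
        (lo+1) hi (max lo_max (PySem.List.pyGetD height lo 0)) hi_max
    else
      twoPtr height
        (PySem.List.pySetD w hi (max hi_max (PySem.List.pyGetD height hi 0) - PySem.List.pyGetD height hi 0))
        lo (hi-1) lo_max (max hi_max (PySem.List.pyGetD height hi 0))
  else w
termination_by (hi + 1 - lo).toNat
decreasing_by
  · omega
  · omega

def count_pools_alt (height : List Int) : Int :=
  let n : Int := PySem.List.len height
  if n < 3 then 0
  else
    let water := twoPtr height (List.replicate height.length 0) 0 (n-1)
        (PySem.List.pyGetD height 0 0) (PySem.List.pyGetD height (-1) 0)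
    (((0 :: water).zip water).map (fun q => if q.2 > 0 ∧ q.1 = 0 then (1:Int) else 0)).sum

-- ===== PRECONDITION & SPEC =====
def Spec_count_pools (height : List Int) (out : Int) : Prop := out = count_pools_alt height
instance (height : List Int) (out : Int) : Decidable (Spec_count_pools height out) := by unfold Spec_count_pools; infer_instance

-- ===== CLAIM (what is proved, stated in full; the proofs are below) =====
def Claim_equal_count_pools : Prop := ∀ (height : List Int), Dom_count_pools height → Spec_count_pools height (count_pools height)

-- ===== LEMMAS AND PROOFS =====

-- the max value of a nonempty list (0 on [] is never used)
def pvM (xs : List Int) : Int := xs.max?.getD 0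
def pvW (h : List Int) (j : Nat) : Int := min (pvM (h.take (j+1))) (pvM (h.drop j)) - h.getD j 0
def pvWL (h : List Int) : List Int := (List.range h.length).map (pvW h)
def pvLML (h : List Int) (k : Nat) : List Int :=
  (List.range h.length).map (fun j => if j < k then pvM (h.take (j+1)) else 0)
def pvRML (h : List Int) (i : Int) : List Int :=
  (List.range h.length).map (fun (j:Nat) => if i < (j:Int) then pvM (h.drop j) else 0)
def pvWLk (h : List Int) (k : Nat) : List Int :=
  (List.range h.length).map (fun j => if j < k then pvW h j else 0)

theorem pvM_mem_le {xs : List Int} {x : Int} (hx : x ∈ xs) : x ≤ pvM xs := by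
  cases hm : xs.max? with
  | none => simp [List.max?_eq_none_iff] at hm; simp [hm] at hx
  | some m =>
    rcases List.max?_eq_some_iff.mp hm with ⟨_, hb⟩
    simpa [pvM, hm] using hb x hx

theorem pvM_mem {xs : List Int} (hne : xs ≠ []) : pvM xs ∈ xs := by
  cases hm : xs.max? with
  | none => simp [List.max?_eq_none_iff] at hm; exact absurd hm hne
  | some m =>
    rcases List.max?_eq_some_iff.mp hm with ⟨hmem, _⟩
    simpa [pvM, hm] using hmem

theorem pvM_cons {t : List Int} (hne : t ≠ []) (a : Int) : pvM (a :: t) = max a (pvM t) := by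
  cases hm : t.max? with
  | none => simp [List.max?_eq_none_iff] at hm; exact absurd hm hne
  | some m => simp [pvM, List.max?_cons, hm]

theorem pvM_append_singleton {xs : List Int} (hne : xs ≠ []) (x : Int) :
    pvM (xs ++ [x]) = max (pvM xs) x := by
  have hmem : pvM xs ∈ xs ++ [x] := List.mem_append_left _ (pvM_mem hne)
  have hx : x ∈ xs ++ [x] := List.mem_append_right _ (by simp)
  have h1 : pvM (xs ++ [x]) ∈ xs ++ [x] := pvM_mem (by simp)
  apply le_antisymm
  · rcases List.mem_append.mp h1 with h | h
    · exact le_max_of_le_left (pvM_mem_le h)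
    · simp at h; simp [h]
  · exact max_le (pvM_mem_le hmem) (pvM_mem_le hx)

theorem pvM_singleton (a : Int) : pvM [a] = a := by simp [pvM]

-- take-max recurrence
theorem pvM_take_succ {h : List Int} {k : Nat} (hk1 : 1 ≤ k) (hkn : k < h.length) :
    pvM (h.take (k+1)) = max (pvM (h.take k)) h[k] := by
  have ht : h.take (k+1) = h.take k ++ [h[k]] := by
    rw [List.take_add_one]; simp [List.getElem?_eq_getElem hkn]
  rw [ht, pvM_append_singleton]
  exact List.ne_nil_of_length_pos (by simp; omega)

-- drop-max recurrence
theorem pvM_drop_eq {h : List Int} {s : Nat} (hs : s + 1 < h.length) :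
    pvM (h.drop s) = max (pvM (h.drop (s+1))) h[s] := by
  have hd : h.drop s = h[s] :: h.drop (s+1) := List.drop_eq_getElem_cons (by omega)
  rw [hd, pvM_cons (by simp [List.drop_eq_nil_iff]; omega), max_comm]

-- setting the next cell of a threshold list
theorem set_thresh {n k : Nat} (f : Nat → Int) (_hk : k < n) :
    ((List.range n).map (fun j => if j < k then f j else 0)).set k (f k)
      = (List.range n).map (fun j => if j < k + 1 then f j else 0) := by
  apply List.ext_getElem (by simp)
  intro j hj1 hj2
  simp only [List.getElem_set, List.getElem_map, List.getElem_range] at *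
  split_ifs <;> simp_all <;> omega

theorem set_thresh' {n s : Nat} (f : Nat → Int) (_hs : s < n) :
    ((List.range n).map (fun (j:Nat) => if (s:Int) < (j:Int) then f j else 0)).set s (f s)
      = (List.range n).map (fun (j:Nat) => if (s:Int) - 1 < (j:Int) then f j else 0) := by
  apply List.ext_getElem (by simp)
  intro j hj1 hj2
  simp only [List.getElem_set, List.getElem_map, List.getElem_range] at *
  split_ifs <;> simp_all <;> omega

-- left_max loop invariant
theorem lm_fold (h : List Int) (_hn : 3 ≤ h.length) :
    ∀ k : Nat, 1 ≤ k → k ≤ h.length →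
    (PySem.List.pyRange 1 (k:Int) 1).foldl (fun lm i =>
        PySem.List.pySetD lm i (max (PySem.List.pyGetD lm (i-1) 0) (PySem.List.pyGetD h i 0)))
      (pvLML h 1) = pvLML h k := by
  intro k
  induction k with
  | zero => omega
  | succ k ih =>
    intro _ hk
    by_cases hk1 : k = 0
    · subst hk1
      rw [PySem.List.pyRange_one_eq_nil (by norm_num), List.foldl_nil]
    · have hk1' : 1 ≤ k := by omega
      have hkn : k < h.length := by omega
      have hcast : ((k+1:Nat):Int) = (k:Int) + 1 := by push_cast; ring
      rw [hcast, PySem.List.pyRange_one_succ_right (by exact_mod_cast hk1'), List.foldl_append,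
        ih hk1' (by omega), List.foldl_cons, List.foldl_nil]
      have e1 : (k:Int) - 1 = ((k-1:Nat):Int) := by omega
      have e2 : PySem.List.pyGetD (pvLML h k) ((k:Int)-1) 0 = pvM (h.take k) := by
        rw [e1, PySem.List.pyGetD_natCast]
        unfold pvLML
        rw [PySem.List.getD_map_range _ _ _ _ (by omega)]
        have : k - 1 + 1 = k := by omega
        simp [this]
        omega
      have e3 : PySem.List.pyGetD h (k:Int) 0 = h[k] := by
        rw [PySem.List.pyGetD_natCast, List.getD_eq_getElem _ _ hkn]
      rw [e2, e3, PySem.List.pySetD_natCast]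
      unfold pvLML
      rw [← pvM_take_succ hk1' hkn, set_thresh _ hkn]

-- right_max loop invariant: i = (s:Int) - 1 counts down to -1
theorem rm_fold (h : List Int) (hn : 3 ≤ h.length) :
    ∀ s : Nat, s ≤ h.length - 1 →
    (PySem.List.pyRange ((s:Int) - 1) (-1) (-1)).foldl (fun rm i =>
        PySem.List.pySetD rm i (max (PySem.List.pyGetD rm (i+1) 0) (PySem.List.pyGetD h i 0)))
      (pvRML h ((s:Int) - 1)) = pvRML h (-1) := by
  intro s
  induction s with
  | zero =>
    intro _
    rw [show ((0:Nat):Int) - 1 = -1 by norm_num,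
      PySem.List.pyRange_neg_one_eq_nil (by norm_num), List.foldl_nil]
  | succ s ih =>
    intro hs
    have hsn : s + 1 < h.length := by omega
    have e0 : ((s+1:Nat):Int) - 1 = (s:Int) := by push_cast; ring
    rw [e0, PySem.List.pyRange_neg_one_cons (by omega), List.foldl_cons]
    have e2 : PySem.List.pyGetD (pvRML h (s:Int)) ((s:Int)+1) 0 = pvM (h.drop (s+1)) := by
      rw [show (s:Int) + 1 = ((s+1:Nat):Int) by push_cast; ring, PySem.List.pyGetD_natCast]
      unfold pvRML
      rw [PySem.List.getD_map_range _ _ _ _ (by omega)]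
      simp
    have e3 : PySem.List.pyGetD h (s:Int) 0 = h[s]'(by omega) := by
      rw [PySem.List.pyGetD_natCast, List.getD_eq_getElem _ _ (by omega)]
    rw [e2, e3, PySem.List.pySetD_natCast]
    have e4 : (pvRML h (s:Int)).set s (max (pvM (h.drop (s+1))) (h[s]'(by omega))) = pvRML h ((s:Int) - 1) := by
      unfold pvRML
      rw [← pvM_drop_eq hsn, set_thresh' _ (by omega)]
    rw [e4]
    exact ih (by omega)

-- initial arrays
theorem lm_init (h : List Int) (hn : 3 ≤ h.length) :
    PySem.List.pySetD (List.replicate h.length (0:Int)) 0 (PySem.List.pyGetD h 0 0)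
      = pvLML h 1 := by
  have h0 : h.getD 0 0 = h[0]'(by omega) := List.getD_eq_getElem _ _ (by omega)
  have ht1 : h.take 1 = [h[0]'(by omega)] := by
    cases h with
    | nil => simp at hn
    | cons a t => simp
  rw [PySem.List.pySetD_of_nonneg _ _ (by norm_num), PySem.List.pyGetD_zero, h0]
  norm_num
  apply List.ext_getElem (by simp [pvLML])
  intro j hj1 hj2
  simp only [pvLML, List.getElem_set, List.getElem_map, List.getElem_range,
    List.getElem_replicate]
  by_cases hj : j = 0
  · subst hj
    rw [if_pos rfl, if_pos (by omega)]
    simp [ht1, pvM_singleton]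
  · rw [if_neg (fun e => hj e.symm), if_neg (by omega)]

theorem rm_init (h : List Int) (hn : 3 ≤ h.length) :
    PySem.List.pySetD (List.replicate h.length (0:Int)) (-1) (PySem.List.pyGetD h (-1) 0)
      = pvRML h (((h.length - 1 : Nat):Int) - 1) := by
  have hne : h ≠ [] := by intro e; simp [e] at hn
  have hd : h.drop (h.length - 1) = [h[h.length - 1]'(by omega)] := by
    rw [List.drop_eq_getElem_cons (by omega)]
    simp [show h.length - 1 + 1 = h.length by omega]
  have hset : PySem.List.pySetD (List.replicate h.length (0:Int)) (-1) (PySem.List.pyGetD h (-1) 0)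
      = (List.replicate h.length (0:Int)).set (h.length - 1) (PySem.List.pyGetD h (-1) 0) := by
    have hl : 0 < (List.replicate h.length (0:Int)).length := by simp; omega
    simp only [PySem.List.pySetD, PySem.List.pySet?, PySem.List.pyIdx?]
    split_ifs with h1 h2 <;> simp_all
  rw [hset, PySem.List.pyGetD_neg_one h 0 hne, List.getLast_eq_getElem]
  apply List.ext_getElem (by simp [pvRML])
  intro j hj1 hj2
  have hjlen : j < h.length := by simpa [pvRML] using hj2
  simp only [pvRML, List.getElem_set, List.getElem_map, List.getElem_range,
    List.getElem_replicate]
  by_cases hj : j = h.length - 1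
  · subst hj
    rw [if_pos rfl, if_pos (by omega)]
    rw [hd, pvM_singleton]
  · rw [if_neg (fun e => hj e.symm), if_neg (by omega)]

-- water loop invariant
theorem w_fold (h : List Int) : ∀ (k : Nat), k ≤ h.length →
    (List.foldl (fun (p : Int × List Int) i =>
        (p.1 + (min (PySem.List.pyGetD (pvLML h h.length) i 0) (PySem.List.pyGetD (pvRML h (-1)) i 0)
            - PySem.List.pyGetD h i 0),
         PySem.List.pySetD p.2 i (min (PySem.List.pyGetD (pvLML h h.length) i 0)
            (PySem.List.pyGetD (pvRML h (-1)) i 0) - PySem.List.pyGetD h i 0)))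
      ((0:Int), List.replicate h.length (0:Int)) (PySem.List.pyRange 0 (k:Int) 1)).2
    = pvWLk h k := by
  intro k
  induction k with
  | zero =>
    intro _
    rw [show ((0:Nat):Int) = 0 by norm_num, PySem.List.pyRange_one_eq_nil le_rfl, List.foldl_nil]
    apply List.ext_getElem (by simp [pvWLk])
    intro j hj1 hj2
    simp [pvWLk]
  | succ k ih =>
    intro hk
    have hkn : k < h.length := by omega
    rw [show ((k+1:Nat):Int) = (k:Int) + 1 by push_cast; ring,
      PySem.List.pyRange_one_succ_right (by positivity), List.foldl_append,
      List.foldl_cons, List.foldl_nil]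
    have e1 : PySem.List.pyGetD (pvLML h h.length) (k:Int) 0 = pvM (h.take (k+1)) := by
      rw [PySem.List.pyGetD_natCast]
      unfold pvLML
      rw [PySem.List.getD_map_range _ _ _ _ hkn]
      simp [hkn]
    have e2 : PySem.List.pyGetD (pvRML h (-1)) (k:Int) 0 = pvM (h.drop k) := by
      rw [PySem.List.pyGetD_natCast]
      unfold pvRML
      rw [PySem.List.getD_map_range _ _ _ _ hkn, if_pos (show (-1:Int) < (k:Int) by omega)]
    have e3 : PySem.List.pyGetD h (k:Int) 0 = h.getD k 0 := PySem.List.pyGetD_natCast h k 0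
    simp only [e1, e2, e3, PySem.List.pySetD_natCast, ih (by omega)]
    unfold pvWLk
    rw [show min (pvM (h.take (k+1))) (pvM (h.drop k)) - h.getD k 0 = pvW h k from rfl,
      set_thresh _ hkn]

-- the final water list of A
theorem pvWLk_top (h : List Int) : pvWLk h h.length = pvWL h := by
  unfold pvWLk pvWL
  apply List.map_congr_left
  intro j hj
  simp at hj
  simp [hj]

-- water is never negative
theorem pvW_nonneg (h : List Int) {j : Nat} (hj : j < h.length) : 0 ≤ pvW h j := by
  have hget : h.getD j 0 = h[j] := List.getD_eq_getElem _ _ hj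
  have h1 : h[j] ∈ h.take (j+1) := by
    have : (h.take (j+1))[j]'(by simp; omega) = h[j] := List.getElem_take
    exact this ▸ List.getElem_mem _
  have h2 : h[j] ∈ h.drop j := by
    rw [List.drop_eq_getElem_cons hj]
    exact List.mem_cons_self
  unfold pvW
  rw [hget]
  have := pvM_mem_le h1
  have := pvM_mem_le h2
  omega

-- the transition-counting fold equals the zip-with-shift count
theorem cnt (ws : List Int) (hw : ∀ w ∈ ws, 0 ≤ w) : ∀ (c prev : Int), 0 ≤ prev →
    (List.foldl (fun (p : Int × Bool) w =>
        if w > 0 && !p.2 then (p.1 + 1, true) else if w == 0 then (p.1, false) else p)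
      (c, decide (0 < prev)) ws).1
    = c + (((prev :: ws).zip ws).map (fun q => if q.2 > 0 ∧ q.1 = 0 then (1:Int) else 0)).sum := by
  induction ws with
  | nil => intro c prev _; simp
  | cons w t ih =>
    intro c prev hprev
    have hw0 : 0 ≤ w := hw w (by simp)
    have hwt : ∀ x ∈ t, 0 ≤ x := fun x hx => hw x (by simp [hx])
    rw [List.foldl_cons, List.zip_cons_cons, List.map_cons, List.sum_cons]
    rcases lt_or_eq_of_le hw0 with hwpos | hwz
    · rcases lt_or_eq_of_le hprev with hppos | hpz
      · have : (if w > 0 && !(decide (0 < prev)) then (c + 1, true)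
            else if w == 0 then (c, false) else (c, decide (0 < prev)))
            = (c, decide (0 < w)) := by
          simp [hwpos, hppos]
          omega
        rw [this, ih hwt c w (le_of_lt hwpos)]
        have : (if w > 0 ∧ prev = 0 then (1:Int) else 0) = 0 := by
          simp; omega
        rw [this]; ring
      · have : (if w > 0 && !(decide (0 < prev)) then (c + 1, true)
            else if w == 0 then (c, false) else (c, decide (0 < prev)))
            = (c + 1, decide (0 < w)) := by
          simp [hwpos, ← hpz]
        rw [this, ih hwt (c+1) w (le_of_lt hwpos)]
        have : (if w > 0 ∧ prev = 0 then (1:Int) else 0) = 1 := by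
          simp [hwpos, hpz.symm]
        rw [this]; ring
    · have : (if w > 0 && !(decide (0 < prev)) then (c + 1, true)
          else if w == 0 then (c, false) else (c, decide (0 < prev)))
          = (c, decide (0 < w)) := by
        simp [← hwz]
      rw [this, ih hwt c w (le_of_eq hwz)]
      have : (if w > 0 ∧ prev = 0 then (1:Int) else 0) = 0 := by
        simp; omega
      rw [this]; ring

-- the count fold over an all-zero water array is 0
theorem cnt_replicate (m : Nat) : ∀ (c : Int) (b : Bool),
    (List.foldl (fun (p : Int × Bool) w =>
        if w > 0 && !p.2 then (p.1 + 1, true) else if w == 0 then (p.1, false) else p)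
      (c, b) (List.replicate m (0:Int))).1 = c := by
  induction m with
  | zero => intro c b; simp
  | succ m ih =>
    intro c b
    rw [List.replicate_succ, List.foldl_cons]
    simpa using ih c false

theorem trap_water_eq (h : List Int) (hn3 : 3 ≤ h.length) : (trap_detailed h).2 = pvWL h := by
  simp only [trap_detailed, PySem.List.len_eq]
  rw [if_neg (show ¬((h.length:Int) < 3) by omega), lm_init h hn3, lm_fold h hn3 h.length (by omega) le_rfl,
    show ((h.length:Int) - 2) = (((h.length - 1 : Nat)):Int) - 1 by omega,
    rm_init h hn3, rm_fold h hn3 (h.length - 1) le_rfl,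
    w_fold h h.length le_rfl, pvWLk_top]

theorem pvM_drop_mono (h : List Int) {a b : Nat} (hab : a ≤ b) (hb : b < h.length) :
    pvM (h.drop b) ≤ pvM (h.drop a) := by
  have hne : h.drop b ≠ [] := List.ne_nil_of_length_pos (by simp; omega)
  have hmem : pvM (h.drop b) ∈ h.drop a := by
    have h1 : pvM (h.drop b) ∈ h.drop b := pvM_mem hne
    have h2 : h.drop b = (h.drop a).drop (b - a) := by
      rw [List.drop_drop]
      congr 1
      omega
    exact List.mem_of_mem_drop (h2 ▸ h1 : _ ∈ List.drop (b-a) (List.drop a h))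
  exact pvM_mem_le hmem

theorem pvM_take_mono (h : List Int) {a b : Nat} (ha : 1 ≤ a) (hab : a ≤ b)
    (hh : h ≠ []) : pvM (h.take a) ≤ pvM (h.take b) := by
  have hne : h.take a ≠ [] := by
    have : 0 < (h.take a).length := by
      simp
      constructor
      · omega
      · exact List.length_pos_iff.mpr hh
    exact List.ne_nil_of_length_pos this
  have hmem : pvM (h.take a) ∈ h.take b := by
    have h1 : pvM (h.take a) ∈ h.take a := pvM_mem hne
    have h2 : h.take a = (h.take b).take a := by
      rw [List.take_take]
      congr 1
      omega
    exact List.mem_of_mem_take (h2 ▸ h1 : _ ∈ List.take a (List.take b h))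
  exact pvM_mem_le hmem

theorem mem_take_self (h : List Int) {j b : Nat} (hj : j < b) (hjn : j < h.length) :
    h[j] ∈ h.take b := by
  have : (h.take b)[j]'(by simp; omega) = h[j] := List.getElem_take
  exact this ▸ List.getElem_mem _

theorem mem_drop_self (h : List Int) {j a : Nat} (ha : a ≤ j) (hjn : j < h.length) :
    h[j] ∈ h.drop a := by
  have : (h.drop a)[j - a]'(by simp; omega) = h[j] := by
    rw [List.getElem_drop]
    congr 1
    omega
  exact this ▸ List.getElem_mem _

theorem pvM_take_one (h : List Int) (hh : 0 < h.length) :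
    pvM (h.take 1) = h[0] := by
  have : h.take 1 = [h[0]] := by
    cases h with
    | nil => simp at hh
    | cons a t => simp
  rw [this, pvM_singleton]

theorem pvM_drop_last (h : List Int) (hh : 0 < h.length) :
    pvM (h.drop (h.length - 1)) = h[h.length - 1]'(by omega) := by
  have : h.drop (h.length - 1) = [h[h.length - 1]'(by omega)] := by
    rw [List.drop_eq_getElem_cons (by omega)]
    simp [show h.length - 1 + 1 = h.length by omega]
  rw [this, pvM_singleton]

theorem twoPtr_spec (h : List Int) (hn : 3 ≤ h.length) :
    ∀ (d lo hi : Nat) (w : List Int),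
    hi + 1 - lo = d →
    lo ≤ hi → hi ≤ h.length - 1 →
    w.length = h.length →
    (∀ j (_ : j < w.length), w[j] = if j < lo ∨ hi < j then pvW h j else 0) →
    twoPtr h w (lo:Int) (hi:Int) (pvM (h.take (max lo 1)))
      (pvM (h.drop (min (hi+1) (h.length-1)))) = pvWL h := by
  intro d
  induction d using Nat.strong_induction_on with
  | _ d ih =>
    intro lo hi w hd hlh hhi hwlen hwval
    have hh : h ≠ [] := List.ne_nil_of_length_pos (by omega)
    have hlo_n : lo < h.length := by omega
    have hhi_n : hi < h.length := by omega
    have hgetlo : PySem.List.pyGetD h (lo:Int) 0 = h[lo] := by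
      rw [PySem.List.pyGetD_natCast, List.getD_eq_getElem _ _ hlo_n]
    have hgethi : PySem.List.pyGetD h (hi:Int) 0 = h[hi] := by
      rw [PySem.List.pyGetD_natCast, List.getD_eq_getElem _ _ hhi_n]
    rw [twoPtr, dif_pos (by exact_mod_cast hlh)]
    by_cases hcmp : pvM (h.take (max lo 1)) ≤ pvM (h.drop (min (hi+1) (h.length-1)))
    · rw [if_pos hcmp]
      have elm : max (pvM (h.take (max lo 1))) (PySem.List.pyGetD h (lo:Int) 0)
          = pvM (h.take (lo+1)) := by
        rw [hgetlo]
        by_cases hlo0 : lo = 0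
        · subst hlo0
          simp [pvM_take_one h (by omega)]
        · rw [show max lo 1 = lo by omega, ← pvM_take_succ (by omega) hlo_n]
      have hdlo : pvM (h.drop (min (hi+1) (h.length-1))) ≤ pvM (h.drop lo) :=
        pvM_drop_mono h (by omega) (by omega)
      have hval : pvM (h.take (lo+1)) - PySem.List.pyGetD h (lo:Int) 0 = pvW h lo := by
        have hle : pvM (h.take (lo+1)) ≤ pvM (h.drop lo) := by
          rw [← elm, hgetlo]
          exact max_le (le_trans hcmp hdlo) (pvM_mem_le (mem_drop_self h le_rfl hlo_n))
        unfold pvW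
        rw [hgetlo, List.getD_eq_getElem _ _ hlo_n, min_eq_left hle]
      rw [elm, hval, show PySem.List.pySetD w (lo:Int) (pvW h lo) = w.set lo (pvW h lo)
          from PySem.List.pySetD_natCast w lo _]
      by_cases hterm : lo = hi
      · rw [twoPtr, dif_neg (by omega)]
        apply List.ext_getElem (by simp [hwlen, pvWL])
        intro j hj1 hj2
        have hjn : j < h.length := by simpa [hwlen] using hj1
        simp only [pvWL, List.getElem_map, List.getElem_range, List.getElem_set]
        by_cases hjlo : lo = j
        · simp [hjlo]
        · rw [if_neg hjlo, hwval j (by simp [hwlen]; exact hjn), if_pos (by omega)]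
      · rw [show (lo:Int) + 1 = ((lo+1:Nat):Int) by push_cast; ring,
          show pvM (h.take (lo+1)) = pvM (h.take (max (lo+1) 1)) by rw [show max (lo+1) 1 = lo+1 by omega]]
        apply ih (d-1) (by omega) (lo+1) hi _ (by omega) (by omega) hhi (by simp [hwlen])
        intro j hjn
        have hjh : j < h.length := by simpa [hwlen] using hjn
        rw [List.getElem_set]
        by_cases hjlo : lo = j
        · simp [← hjlo]
        · rw [if_neg hjlo, hwval j (by simpa [hwlen] using hjn)]
          by_cases hc : j < lo ∨ hi < j
          · rw [if_pos hc, if_pos (by omega)]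
          · rw [if_neg hc, if_neg (by omega)]
    · rw [if_neg hcmp]
      have hlm_le : pvM (h.take (max lo 1)) ≤ pvM (h.take (hi+1)) :=
        pvM_take_mono h (by omega) (by omega) hh
      have ehm : max (pvM (h.drop (min (hi+1) (h.length-1)))) (PySem.List.pyGetD h (hi:Int) 0)
          = pvM (h.drop hi) := by
        rw [hgethi]
        by_cases hhil : hi = h.length - 1
        · rw [show min (hi+1) (h.length-1) = hi by omega]
          exact max_eq_left (pvM_mem_le (mem_drop_self h le_rfl hhi_n))
        · rw [show min (hi+1) (h.length-1) = hi+1 by omega,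
            show pvM (List.drop hi h) = max (pvM (List.drop (hi+1) h)) (h[hi]'hhi_n) from pvM_drop_eq (by omega)]
      have hval : pvM (h.drop hi) - PySem.List.pyGetD h (hi:Int) 0 = pvW h hi := by
        have hle : pvM (h.drop hi) ≤ pvM (h.take (hi+1)) := by
          rw [← ehm, hgethi]
          exact max_le (le_trans ((not_le.mp hcmp).le) hlm_le)
            (pvM_mem_le (mem_take_self h (by omega) hhi_n))
        unfold pvW
        rw [hgethi, List.getD_eq_getElem _ _ hhi_n, min_eq_right hle]
      rw [ehm, hval, show PySem.List.pySetD w (hi:Int) (pvW h hi) = w.set hi (pvW h hi)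
          from PySem.List.pySetD_natCast w hi _]
      by_cases hterm : lo = hi
      · rw [twoPtr, dif_neg (by omega)]
        apply List.ext_getElem (by simp [hwlen, pvWL])
        intro j hj1 hj2
        have hjn : j < h.length := by simpa [hwlen] using hj1
        simp only [pvWL, List.getElem_map, List.getElem_range, List.getElem_set]
        by_cases hjhi : hi = j
        · simp [hjhi]
        · rw [if_neg hjhi, hwval j (by simp [hwlen]; exact hjn), if_pos (by omega)]
      · rw [show (hi:Int) - 1 = ((hi-1:Nat):Int) by omega,
          show pvM (h.drop hi) = pvM (h.drop (min ((hi-1)+1) (h.length-1))) by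
            rw [show min ((hi-1)+1) (h.length-1) = hi by omega]]
        apply ih (d-1) (by omega) lo (hi-1) _ (by omega) (by omega) (by omega) (by simp [hwlen])
        intro j hjn
        have hjh : j < h.length := by simpa [hwlen] using hjn
        rw [List.getElem_set]
        by_cases hjhi : hi = j
        · simp [← hjhi]
          intro _ h0
          omega
        · rw [if_neg hjhi, hwval j (by simpa [hwlen] using hjn)]
          by_cases hc : j < lo ∨ hi < j
          · rw [if_pos hc, if_pos (by omega)]
          · rw [if_neg hc, if_neg (by omega)]

theorem twoPtr_water (h : List Int) (hn3 : 3 ≤ h.length) :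
    twoPtr h (List.replicate h.length 0) 0 ((h.length:Int) - 1)
      (PySem.List.pyGetD h 0 0) (PySem.List.pyGetD h (-1) 0) = pvWL h := by
  have e1 : PySem.List.pyGetD h 0 0 = pvM (h.take (max 0 1)) := by
    rw [PySem.List.pyGetD_zero, List.getD_eq_getElem _ _ (by omega)]
    simp [pvM_take_one h (by omega)]
  have e2 : PySem.List.pyGetD h (-1) 0
      = pvM (h.drop (min ((h.length-1)+1) (h.length-1))) := by
    rw [PySem.List.pyGetD_neg_one h 0 (List.ne_nil_of_length_pos (by omega)),
      List.getLast_eq_getElem,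
      show min ((h.length-1)+1) (h.length-1) = h.length - 1 by omega,
      pvM_drop_last h (by omega)]
  rw [e1, e2, show (0:Int) = ((0:Nat):Int) from rfl,
    show (h.length:Int) - 1 = ((h.length - 1:Nat):Int) by omega]
  apply twoPtr_spec h hn3 (h.length - 1 + 1 - 0) 0 (h.length-1) _ rfl (by omega) le_rfl
    (by simp)
  intro j hj
  simp only [List.length_replicate] at hj
  rw [List.getElem_replicate, if_neg (by omega)]
  norm_num

-- ===== VERDICT (by name: the statement is the Claim_ definition above) =====
theorem count_pools_spec : Claim_equal_count_pools := by
  intro h _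
  unfold Spec_count_pools
  by_cases hn : h.length < 3
  · have hc : PySem.List.len h < 3 := by simp [PySem.List.len_eq]; omega
    simp only [count_pools, count_pools_alt, trap_detailed, hc, if_true]
    exact cnt_replicate h.length 0 false
  · have hn3 : 3 ≤ h.length := by omega
    simp only [count_pools, count_pools_alt, PySem.List.len_eq]
    rw [if_neg (show ¬((h.length:Int) < 3) by omega)]
    rw [trap_water_eq h hn3, twoPtr_water h hn3]
    have hw : ∀ w ∈ pvWL h, 0 ≤ w := by
      intro w hwmem
      unfold pvWL at hwmem
      rcases List.mem_map.mp hwmem with ⟨j, hj, rfl⟩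
      exact pvW_nonneg h (List.mem_range.mp hj)
    have E := cnt (pvWL h) hw 0 0 le_rfl
    rw [show decide ((0:Int) < 0) = false from rfl] at E
    rw [E]
    ring
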